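-- pv_equiv track=rewrite | github.com/ursa-mikail/python-gaia | Libraries/text/keywords_grep.py | split_with_symbols
-- ===== SOURCE A (Python) =====
-- def split_with_symbols(string, symbols):
--     str_tokens = list(string);
--     string_unmet_with_symbol = ""; # continous string not meeting given symbol
--     str_tokens_filtered = [];
--
--     counter = 0;
--
--     for character in str_tokens:
--         counter = counter + 1;
--
--         if (character not in symbols): #
--             string_unmet_with_symbol = string_unmet_with_symbol + character;
--         else:
--             if (string_unmet_with_symbol != ""):
--                 str_tokens_filtered.append(string_unmet_with_symbol);
--                 string_unmet_with_symbol = "";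
--
--         if (counter == len(string)) & (character not in symbols): # end of string and without meeting given symbol
--             if (string_unmet_with_symbol != ""):
--                 str_tokens_filtered.append(string_unmet_with_symbol);
--                 string_unmet_with_symbol = "";
--
--     return str_tokens_filtered;
-- ===== SOURCE B (Python) =====
-- from itertools import groupby
--
-- def split_with_symbols(string, symbols):
--     return [''.join(g) for k, g in groupby(string, key=lambda c: c in symbols) if not k]
-- ===== Notes on version B (the rewrite author's own statement) =====
-- stated objective: idiomatic
-- what changed: Replaced the manual character loop with its running buffer, flush logic and end-of-string counter check by itertools.groupby over the string keyed on symbol membership, keeping only the non-symbol runs.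
import Mathlib
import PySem

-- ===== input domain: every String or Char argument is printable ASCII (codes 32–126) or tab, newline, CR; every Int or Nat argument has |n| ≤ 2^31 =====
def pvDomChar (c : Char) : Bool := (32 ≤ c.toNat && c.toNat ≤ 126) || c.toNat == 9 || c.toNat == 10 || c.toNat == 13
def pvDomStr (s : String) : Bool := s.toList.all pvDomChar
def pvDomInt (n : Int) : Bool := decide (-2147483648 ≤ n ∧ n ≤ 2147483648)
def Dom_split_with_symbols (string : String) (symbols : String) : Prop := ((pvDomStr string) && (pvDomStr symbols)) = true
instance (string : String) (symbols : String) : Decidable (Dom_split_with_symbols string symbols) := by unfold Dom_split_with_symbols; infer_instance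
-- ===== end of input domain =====

-- B replaces A's manual buffer/flush/counter loop by grouping the string into
-- maximal runs keyed on symbol membership and keeping the non-symbol runs (idiomatic; not faster).

-- ===== PORT A =====
-- 'character in symbols' (character a 1-char string) → PySem.Str.isIn ⟨[c]⟩ symbols, exact
def pvIsSym (symbols : String) (c : Char) : Bool := PySem.Str.isIn (String.ofList [c]) symbols

-- the loop body of A's for-loop; the buffer is kept as List Char
-- (Python's 'buf + character' is buf ++ [character], 'buf != ""' is buf ≠ []; exact)
def pvStepA (symbols : String) (L : Int) (st : List Char × List String × Int) (character : Char) :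
    List Char × List String × Int :=
  let counter := st.2.2 + 1
  let (unmet, filtered) :=
    if !(pvIsSym symbols character) then (st.1 ++ [character], st.2.1)
    else if st.1 ≠ [] then ([], st.2.1 ++ [String.ofList st.1])
    else (st.1, st.2.1)
  let (unmet, filtered) :=
    if (counter == L) && !(pvIsSym symbols character) then
      if unmet ≠ [] then ([], filtered ++ [String.ofList unmet]) else (unmet, filtered)
    else (unmet, filtered)
  (unmet, filtered, counter)

def split_with_symbols (string : String) (symbols : String) : List String :=
  (string.toList.foldl (pvStepA symbols (PySem.Str.len string)) ([], [], 0)).2.1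

-- ===== PORT B =====
-- itertools.groupby: maximal runs of consecutive chars with equal key, left to right
def pvGroupby (key : Char → Bool) : List Char → List (Bool × List Char)
  | [] => []
  | c :: cs =>
    (key c, c :: cs.takeWhile (fun d => key d == key c)) ::
      pvGroupby key (cs.dropWhile (fun d => key d == key c))
termination_by l => l.length
decreasing_by simpa using Nat.lt_succ_of_le (List.length_dropWhile_le _ _)

def split_with_symbols_alt (string : String) (symbols : String) : List String :=
  ((pvGroupby (pvIsSym symbols) string.toList).filter (fun r => !r.1)).map
    (fun r => String.ofList r.2)

-- ===== PRECONDITION & SPEC =====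
def Spec_split_with_symbols (string : String) (symbols : String) (out : List String) : Prop := out = split_with_symbols_alt string symbols
instance (string : String) (symbols : String) (out : List String) : Decidable (Spec_split_with_symbols string symbols out) := by unfold Spec_split_with_symbols; infer_instance

-- ===== CLAIM (what is proved, stated in full; the proofs are below) =====
def Claim_equal_split_with_symbols : Prop := ∀ (string : String) (symbols : String), Dom_split_with_symbols string symbols → Spec_split_with_symbols string symbols (split_with_symbols string symbols)

-- ===== LEMMAS AND PROOFS =====

-- reference tokenizer: buffer of pending non-symbol chars, flushed on a symbol / at the end
def pvTok (key : Char → Bool) : List Char → List Char → List String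
  | buf, [] => if buf = [] then [] else [String.ofList buf]
  | buf, c :: cs =>
    if key c then
      (if buf = [] then pvTok key [] cs else String.ofList buf :: pvTok key [] cs)
    else pvTok key (buf ++ [c]) cs

lemma pvTok_accum (key : Char → Bool) :
    ∀ (cs buf : List Char),
      pvTok key buf cs =
        pvTok key (buf ++ cs.takeWhile (fun d => !key d)) (cs.dropWhile (fun d => !key d)) := by
  intro cs
  induction cs with
  | nil => intro buf; simp
  | cons c cs ih =>
    intro buf
    by_cases h : key c
    · simp [List.takeWhile, List.dropWhile, h]
    · simp only [pvTok, h, List.takeWhile_cons, List.dropWhile_cons]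
      simp [ih (buf ++ [c])]

lemma pvTok_skip (key : Char → Bool) :
    ∀ (cs : List Char), pvTok key [] cs = pvTok key [] (cs.dropWhile key) := by
  intro cs
  induction cs with
  | nil => simp
  | cons c cs ih =>
    by_cases h : key c
    · simp [pvTok, h, ih]
    · simp [h]

lemma pvDropWhile_head {α : Type} (p : α → Bool) :
    ∀ (l : List α) (d : α) (r : List α), l.dropWhile p = d :: r → p d = false := by
  intro l
  induction l with
  | nil => intro d r h; simp at h
  | cons a l ih =>
    intro d r h
    by_cases ha : p a
    · rw [List.dropWhile_cons_of_pos ha] at h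
      exact ih d r h
    · rw [List.dropWhile_cons_of_neg ha] at h
      cases h
      simpa using ha

lemma pvTok_eq_groupby (key : Char → Bool) :
    ∀ (cs : List Char),
      pvTok key [] cs =
        ((pvGroupby key cs).filter (fun r => !r.1)).map (fun r => String.ofList r.2) := by
  intro cs
  induction hn : cs.length using Nat.strong_induction_on generalizing cs with
  | _ n ih =>
  match cs with
  | [] => simp [pvTok, pvGroupby]
  | c :: cs =>
    by_cases h : key c
    · -- symbol run: dropped by the filter; tokenizer skips the same chars
      rw [pvGroupby]
      simp only [h, Bool.not_true, List.filter_cons_of_neg, Bool.false_eq_true,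
        not_false_iff]
      have hkey : (fun d => key d == true) = key := by
        funext d; simp
      rw [hkey]
      have hlen : (cs.dropWhile key).length < n := by
        subst hn
        exact Nat.lt_succ_of_le (List.length_dropWhile_le _ _)
      rw [← ih _ hlen _ rfl]
      show pvTok key [] (c :: cs) = pvTok key [] (cs.dropWhile key)
      rw [show pvTok key [] (c :: cs) = pvTok key [] cs by simp [pvTok, h]]
      exact pvTok_skip key cs
    · -- non-symbol run: kept; tokenizer accumulates exactly this run
      rw [pvGroupby]
      rw [show key c = false by simp [h]]
      simp only [Bool.not_false, List.filter_cons_of_pos, List.map_cons]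
      have hkey : (fun d => key d == false) = (fun d => !key d) := by
        funext d; simp
      rw [hkey]
      have hacc := pvTok_accum key (c :: cs) []
      simp only [List.takeWhile_cons, List.dropWhile_cons, h, Bool.not_false,
        if_true, List.nil_append] at hacc
      rw [hacc]
      set t := c :: cs.takeWhile (fun d => !key d) with ht
      cases hr : cs.dropWhile (fun d => !key d) with
      | nil => simp [pvTok, pvGroupby, ht]
      | cons d r =>
        have hd : key d = true := by
          have := pvDropWhile_head (fun d => !key d) cs d r hr
          simpa using this
        have hlen : (d :: r).length < n := by
          subst hn
          have := List.length_dropWhile_le (p := fun d => !key d) (l := cs)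
          rw [hr] at this
          simp only [List.length_cons] at this ⊢
          omega
        rw [← ih _ hlen _ rfl]
        rw [show pvTok key t (d :: r) = String.ofList t :: pvTok key [] r by
          simp [pvTok, hd, ht]]
        rw [show pvTok key [] (d :: r) = pvTok key [] r by simp [pvTok, hd]]

lemma pvFoldA (string symbols : String) :
    ∀ (cs buf : List Char) (filtered : List String) (counter : Int),
      counter + cs.length = PySem.Str.len string →
      (cs = [] → buf = []) →
      (cs.foldl (pvStepA symbols (PySem.Str.len string)) (buf, filtered, counter)).2.1 =
        filtered ++ pvTok (pvIsSym symbols) buf cs := by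
  intro cs
  induction cs with
  | nil =>
    intro buf filtered counter _ hb
    simp [pvTok, hb rfl]
  | cons c cs ih =>
    intro buf filtered counter h hb
    rw [List.foldl_cons]
    by_cases hc : pvIsSym symbols c
    · -- symbol character: flush the buffer if non-empty; end-of-string check is off
      by_cases hbuf : buf = []
      · have hstep : pvStepA symbols (PySem.Str.len string) (buf, filtered, counter) c =
            (buf, filtered, counter + 1) := by
          simp [pvStepA, hc, hbuf]
        rw [hstep]
        rw [ih buf filtered (counter + 1)
          (by simp only [List.length_cons] at h; push_cast at h ⊢; omega)
          (fun hcs => hbuf)]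
        rw [show pvTok (pvIsSym symbols) buf (c :: cs) = pvTok (pvIsSym symbols) [] cs by
          simp [pvTok, hc, hbuf]]
        rw [hbuf]
      · have hstep : pvStepA symbols (PySem.Str.len string) (buf, filtered, counter) c =
            ([], filtered ++ [String.ofList buf], counter + 1) := by
          simp [pvStepA, hc, hbuf]
        rw [hstep]
        rw [ih [] (filtered ++ [String.ofList buf]) (counter + 1)
          (by simp only [List.length_cons] at h; push_cast at h ⊢; omega)
          (fun _ => rfl)]
        rw [show pvTok (pvIsSym symbols) buf (c :: cs) =
              String.ofList buf :: pvTok (pvIsSym symbols) [] cs by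
          simp [pvTok, hc, hbuf]]
        simp
    · -- non-symbol character: accumulate; flush only at the very last position
      cases cs with
      | nil =>
        have hL : counter + 1 = PySem.Str.len string := by
          simp only [List.length_cons, List.length_nil] at h; push_cast at h ⊢; omega
        have hstep : pvStepA symbols (PySem.Str.len string) (buf, filtered, counter) c =
            ([], filtered ++ [String.ofList (buf ++ [c])], counter + 1) := by
          simp [pvStepA, hc, hL]
        rw [hstep]
        simp [pvTok, hc]
      | cons d ds =>
        have hne : counter + 1 ≠ (string.length : Int) := by
          simp only [List.length_cons, PySem.Str.len_eq, String.length_toList] at h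
          push_cast at h
          omega
        have hstep : pvStepA symbols (PySem.Str.len string) (buf, filtered, counter) c =
            (buf ++ [c], filtered, counter + 1) := by
          simp [pvStepA, hc, hne]
        rw [hstep]
        rw [ih (buf ++ [c]) filtered (counter + 1)
          (by simp only [List.length_cons] at h ⊢; push_cast at h ⊢; omega)
          (by intro hcs; cases hcs)]
        rw [show pvTok (pvIsSym symbols) buf (c :: d :: ds) =
              pvTok (pvIsSym symbols) (buf ++ [c]) (d :: ds) by
          simp [pvTok, hc]]

-- ===== VERDICT (by name: the statement is the Claim_ definition above) =====
theorem split_with_symbols_spec : Claim_equal_split_with_symbols := by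
  intro string symbols _
  show split_with_symbols string symbols = split_with_symbols_alt string symbols
  unfold split_with_symbols split_with_symbols_alt
  rw [pvFoldA string symbols string.toList [] [] 0 (by simp [PySem.Str.len]) (fun _ => rfl)]
  rw [pvTok_eq_groupby]
  simp
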